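-- pv_equiv track=rewrite | github.com/yangDM9378/TIL | Algorithm/minco/16.5/16.5_3.py | min_li
-- ===== SOURCE A (Python) =====
-- def min_li(li):
--     temp=li[0][0]
--     for i in range(2):
--         for j in range(3):
--             if li[i][j]<=temp:
--                 temp=li[i][j]
--                 li_i, li_j = i, j
--     return f'({li_i},{li_j})'
-- ===== SOURCE B (Python) =====
-- def min_li(li):
--     m = min(li[i][j] for i in range(2) for j in range(3))
--     for i in range(2):
--         for j in range(3):
--             if li[i][j] == m:
--                 li_i, li_j = i, j
--     return f'({li_i},{li_j})'
-- ===== Notes on version B (the rewrite author's own statement) =====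
-- stated objective: alternative
-- what changed: B replaces A's single stateful pass threading a running minimum 'temp' by two independent passes: first compute the minimum of the six cells with min(), then record the last position equal to it.
import Mathlib
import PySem

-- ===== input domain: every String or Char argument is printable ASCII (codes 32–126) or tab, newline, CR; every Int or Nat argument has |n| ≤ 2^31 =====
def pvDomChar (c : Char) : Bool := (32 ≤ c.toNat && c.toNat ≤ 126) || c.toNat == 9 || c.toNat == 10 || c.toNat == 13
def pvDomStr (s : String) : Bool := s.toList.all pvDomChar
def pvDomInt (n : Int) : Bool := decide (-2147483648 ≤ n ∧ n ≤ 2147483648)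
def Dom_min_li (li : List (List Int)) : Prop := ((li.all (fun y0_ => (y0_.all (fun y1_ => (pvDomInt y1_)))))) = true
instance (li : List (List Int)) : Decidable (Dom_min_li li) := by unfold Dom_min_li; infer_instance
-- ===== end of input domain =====

-- B computes the minimum of the six cells in a first pass, then records the last position equal
-- to it in a second pass, replacing A's single pass that threads a running minimum (alternative).


-- ===== PORT A =====
-- li[i][j]; the pyGetD defaults are never reached on inputs satisfying Pre_ (rows 0,1 exist, ≥ 3 entries)
def pvCell (li : List (List Int)) (i j : Int) : Int :=
  PySem.List.pyGetD (PySem.List.pyGetD li i []) j 0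

def min_li (li : List (List Int)) : String :=
  let st := (PySem.List.pyRange 0 2 1).foldl (fun st i =>
      (PySem.List.pyRange 0 3 1).foldl (fun st j =>
        if pvCell li i j ≤ st.1 then (pvCell li i j, i, j) else st) st)
    (pvCell li 0 0, 0, 0)
  "(" ++ PySem.Int.toStr st.2.1 ++ "," ++ PySem.Int.toStr st.2.2 ++ ")"

-- ===== PORT B =====
def min_li_alt (li : List (List Int)) : String :=
  let m := (PySem.List.min?
      ((PySem.List.pyRange 0 2 1).flatMap (fun i =>
        (PySem.List.pyRange 0 3 1).map (fun j => pvCell li i j))) (fun x => x)).getD 0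
  let p := (PySem.List.pyRange 0 2 1).foldl (fun p i =>
      (PySem.List.pyRange 0 3 1).foldl (fun p j =>
        if pvCell li i j == m then (i, j) else p) p)
    ((0 : Int), (0 : Int))
  "(" ++ PySem.Int.toStr p.1 ++ "," ++ PySem.Int.toStr p.2 ++ ")"

-- ===== PRECONDITION & SPEC =====
-- A raises IndexError unless li has at least 2 rows and rows 0 and 1 have at least 3 entries.
def Pre_min_li (li : List (List Int)) : Prop :=
  2 ≤ li.length ∧ ∀ r ∈ li.take 2, 3 ≤ r.length
instance (li : List (List Int)) : Decidable (Pre_min_li li) := by unfold Pre_min_li; infer_instance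

def pvWitness_min_li : List (List Int) := [[3, 1, 2], [0, 5, 0]]

def Spec_min_li (li : List (List Int)) (out : String) : Prop := out = min_li_alt li
instance (li : List (List Int)) (out : String) : Decidable (Spec_min_li li out) := by unfold Spec_min_li; infer_instance

-- ===== CLAIM (what is proved, stated in full; the proofs are below) =====
def Claim_equal_min_li : Prop := ∀ (li : List (List Int)), Dom_min_li li → Pre_min_li li → Spec_min_li li (min_li li)

-- ===== LEMMAS AND PROOFS =====

-- A's loop body: state (temp, position), element (value, position)
def stepA (st : Int × Int × Int) (x : Int × Int × Int) : Int × Int × Int :=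
  if x.1 ≤ st.1 then x else st

-- B's loop body, for a fixed minimum m
def stepB (m : Int) (p : Int × Int) (x : Int × Int × Int) : Int × Int :=
  if x.1 = m then x.2 else p

theorem fmin_cases (vs : List Int) (t : Int) :
    vs.foldl min t = t ∨ ∃ y ∈ vs, vs.foldl min t = y := by
  induction vs generalizing t with
  | nil => left; rfl
  | cons v vs ih =>
    rcases ih (min t v) with h | ⟨y, hy, h⟩
    · by_cases hle : t ≤ v
      · left; simpa [min_eq_left hle] using h
      · right
        exact ⟨v, List.mem_cons_self, by
          simpa [min_eq_right (by omega : v ≤ t)] using h⟩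
    · right; exact ⟨y, List.mem_cons_of_mem _ hy, h⟩

theorem foldB_congr (m : Int) (l : List (Int × Int × Int)) (p q : Int × Int)
    (h : ∃ x ∈ l, x.1 = m) : l.foldl (stepB m) p = l.foldl (stepB m) q := by
  induction l generalizing p q with
  | nil => obtain ⟨x, hx, -⟩ := h; cases hx
  | cons x l ih =>
    obtain ⟨y, hy, hym⟩ := h
    rcases List.mem_cons.mp hy with h | h
    · subst h
      by_cases hm : ∃ z ∈ l, z.1 = m
      · exact ih _ _ hm
      · simp only [List.foldl_cons, stepB, if_pos hym]
    · exact ih _ _ ⟨y, h, hym⟩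

theorem foldA_eq_foldB (l : List (Int × Int × Int)) (t : Int) (p : Int × Int) :
    (l.foldl stepA (t, p)).2 = l.foldl (stepB ((l.map Prod.fst).foldl min t)) p := by
  induction l generalizing t p with
  | nil => rfl
  | cons x l ih =>
    have hstA : stepA (t, p) x = (min t x.1, if x.1 ≤ t then x.2 else p) := by
      by_cases h : x.1 ≤ t
      · simp [stepA, h]
      · simp [stepA, h, min_eq_left (by omega : t ≤ x.1)]
    have hm : ((x :: l).map Prod.fst).foldl min t = (l.map Prod.fst).foldl min (min t x.1) := rfl
    rw [List.foldl_cons, hstA, hm]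
    rw [ih (min t x.1) _]
    by_cases hex : ∃ z ∈ l, z.1 = (l.map Prod.fst).foldl min (min t x.1)
    · rw [List.foldl_cons]
      exact foldB_congr _ _ _ _ hex
    · have hinit : (if x.1 ≤ t then x.2 else p)
          = stepB ((l.map Prod.fst).foldl min (min t x.1)) p x := by
        have hmv : (l.map Prod.fst).foldl min (min t x.1) = min t x.1 := by
          rcases fmin_cases (l.map Prod.fst) (min t x.1) with h | ⟨y, hy, h⟩
          · exact h
          · obtain ⟨z, hz, hzy⟩ := List.mem_map.mp hy
            exact absurd ⟨z, hz, by rw [hzy, h]⟩ hex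
        rw [hmv]
        unfold stepB
        by_cases h : x.1 ≤ t
        · rw [if_pos h, if_pos (min_eq_right h).symm]
        · rw [if_neg h, if_neg (by rw [min_eq_left (by omega : t ≤ x.1)]; omega)]
      rw [List.foldl_cons, hinit]

theorem min_li_eq_alt (a b c d e f : Int) (r0 r1 : List Int) (rest : List (List Int)) :
    min_li ((a :: b :: c :: r0) :: (d :: e :: f :: r1) :: rest)
      = min_li_alt ((a :: b :: c :: r0) :: (d :: e :: f :: r1) :: rest) := by
  have h2 : PySem.List.pyRange 0 2 1 = [0, 1] := by decide
  have h3 : PySem.List.pyRange 0 3 1 = [0, 1, 2] := by decide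
  have e00 : pvCell ((a :: b :: c :: r0) :: (d :: e :: f :: r1) :: rest) 0 0 = a := by
    unfold pvCell
    rw [PySem.List.pyGetD_ofNat' _ 0, PySem.List.pyGetD_ofNat' _ 0]
    simp
  have e01 : pvCell ((a :: b :: c :: r0) :: (d :: e :: f :: r1) :: rest) 0 1 = b := by
    unfold pvCell
    rw [PySem.List.pyGetD_ofNat' _ 0, PySem.List.pyGetD_ofNat' _ 1]
    simp
  have e02 : pvCell ((a :: b :: c :: r0) :: (d :: e :: f :: r1) :: rest) 0 2 = c := by
    unfold pvCell
    rw [PySem.List.pyGetD_ofNat' _ 0, PySem.List.pyGetD_ofNat' _ 2]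
    simp
  have e10 : pvCell ((a :: b :: c :: r0) :: (d :: e :: f :: r1) :: rest) 1 0 = d := by
    unfold pvCell
    rw [PySem.List.pyGetD_ofNat' _ 1, PySem.List.pyGetD_ofNat' _ 0]
    simp
  have e11 : pvCell ((a :: b :: c :: r0) :: (d :: e :: f :: r1) :: rest) 1 1 = e := by
    unfold pvCell
    rw [PySem.List.pyGetD_ofNat' _ 1, PySem.List.pyGetD_ofNat' _ 1]
    simp
  have e12 : pvCell ((a :: b :: c :: r0) :: (d :: e :: f :: r1) :: rest) 1 2 = f := by
    unfold pvCell
    rw [PySem.List.pyGetD_ofNat' _ 1, PySem.List.pyGetD_ofNat' _ 2]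
    simp
  have key := foldA_eq_foldB
    [(a, ((0 : Int), (0 : Int))), (b, (0, 1)), (c, (0, 2)), (d, (1, 0)), (e, (1, 1)), (f, (1, 2))]
    a (0, 0)
  simp only [List.foldl_cons, List.foldl_nil, List.map_cons, List.map_nil, stepA, stepB,
    min_self, le_refl, if_true] at key
  simp only [min_li, min_li_alt, h2, h3, e00, e01, e02, e10, e11, e12,
    List.flatMap_cons, List.map_cons, List.map_nil, List.flatMap_nil,
    List.append_nil, List.cons_append, List.nil_append,
    PySem.List.min?_id_cons, Option.getD_some, beq_iff_eq,
    List.foldl_cons, List.foldl_nil, le_refl, if_true]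
  rw [key]

-- ===== VERDICT (by name: the statement is the Claim_ definition above) =====
theorem min_li_spec : Claim_equal_min_li := by
  intro li _ hpre
  obtain ⟨hlen, hrows⟩ := hpre
  match li, hlen with
  | r0 :: r1 :: rest, _ =>
    have h0 : 3 ≤ r0.length := hrows r0 (by simp)
    have h1 : 3 ≤ r1.length := hrows r1 (by simp)
    match r0, h0, r1, h1 with
    | a :: b :: c :: t0, _, d :: e :: f :: t1, _ =>
      exact min_li_eq_alt a b c d e f t0 t1 rest
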